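-- pv_equiv track=rewrite | github.com/Pham-Van-Khiem-Toan-Tin/cryptography | des_cbc.py | plaintext_to_blocks
-- ===== SOURCE A (Python) =====
-- def string_to_binary(s):
--     return ''.join(format(ord(c), '08b') for c in s)
--
-- def pkcs5_padding(plaintext):
--     """Áp dụng đệm PKCS#5 cho plaintext"""
--     block_size = 8  # 8 byte = 64 bit
--     padding_needed = block_size - (len(plaintext) % block_size)
--     padding_char = chr(padding_needed)
--     padded_text = plaintext + padding_char * padding_needed
--     return padded_text
--
-- def plaintext_to_blocks(plaintext):
--     """Chuyển plaintext thành các khối 64 bit với đệm PKCS#5"""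
--     # Áp dụng đệm PKCS#5
--     padded_text = pkcs5_padding(plaintext)
--
--     # Chuyển thành nhị phân
--     binary_text = string_to_binary(padded_text)
--
--     # Chia thành các khối 64 bit
--     blocks = []
--     for i in range(0, len(binary_text), 64):
--         block = binary_text[i:i+64]
--         blocks.append(block)
--
--     return blocks
-- ===== SOURCE B (Python) =====
-- def plaintext_to_blocks(plaintext):
--     """PKCS#5-pad, then emit one 64-bit block per 8-character chunk directly,
--     without materializing the full concatenated binary string."""
--     pad = 8 - len(plaintext) % 8
--     padded = plaintext + chr(pad) * pad
--     blocks = []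
--     for i in range(0, len(padded), 8):
--         blocks.append(''.join(format(ord(c), '08b') for c in padded[i:i+8]))
--     return blocks
-- ===== Notes on version B (the rewrite author's own statement) =====
-- stated objective: alternative
-- what changed: B keeps the PKCS#5 padding but never builds the full-length binary string: it iterates over the padded text in 8-character chunks and emits each 64-bit block directly from its 8 source characters.
import Mathlib
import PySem

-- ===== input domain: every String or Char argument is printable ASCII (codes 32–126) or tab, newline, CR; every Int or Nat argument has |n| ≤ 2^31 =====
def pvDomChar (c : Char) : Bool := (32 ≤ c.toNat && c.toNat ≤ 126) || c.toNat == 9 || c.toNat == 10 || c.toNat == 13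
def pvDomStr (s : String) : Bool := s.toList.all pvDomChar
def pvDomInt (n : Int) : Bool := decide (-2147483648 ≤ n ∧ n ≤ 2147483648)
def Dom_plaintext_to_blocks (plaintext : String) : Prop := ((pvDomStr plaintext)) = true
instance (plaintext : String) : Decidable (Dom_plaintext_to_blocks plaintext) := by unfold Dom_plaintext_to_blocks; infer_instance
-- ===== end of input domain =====

-- B chunks the padded text 8 characters at a time and emits each 64-bit block directly,
-- instead of A's building one full binary string and slicing it every 64 bits (objective: alternative).


-- format(ord(c), '08b'): binary digits of ord(c), left-padded with '0' to width 8 (exact: ord(c) ≥ 0)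
def pvFmt8 (c : Char) : List Char :=
  let bs := PySem.Int.toBinChars (c.toNat : Int)
  List.replicate (8 - bs.length) '0' ++ bs

-- ===== PORT A =====
-- ''.join(format(ord(c), '08b') for c in s)   (on the List Char side)
def string_to_binary (s : List Char) : List Char := s.flatMap pvFmt8

-- pkcs5_padding: len/%/chr computed in Nat (exact: len(plaintext) ≥ 0 and 1 ≤ pad ≤ 8)
def pkcs5_padding (plaintext : String) : List Char :=
  let l := plaintext.toList
  let padding_needed : Nat := 8 - l.length % 8
  l ++ List.replicate padding_needed (Char.ofNat padding_needed)

def plaintext_to_blocks (plaintext : String) : List String :=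
  let padded_text := pkcs5_padding plaintext
  let binary_text := string_to_binary padded_text
  (PySem.List.pyRange 0 (binary_text.length : Int) 64).foldl
    (fun blocks i =>
      blocks ++ [String.ofList (PySem.List.slice binary_text (some i) (some (i + 64)))]) []

-- ===== PORT B =====
def plaintext_to_blocks_alt (plaintext : String) : List String :=
  let l := plaintext.toList
  let pad : Nat := 8 - l.length % 8
  let padded := l ++ List.replicate pad (Char.ofNat pad)
  (PySem.List.pyRange 0 (padded.length : Int) 8).foldl
    (fun blocks i =>
      blocks ++ [String.ofList ((PySem.List.slice padded (some i) (some (i + 8))).flatMap pvFmt8)]) []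

-- ===== PRECONDITION & SPEC =====
def Spec_plaintext_to_blocks (plaintext : String) (out : List String) : Prop := out = plaintext_to_blocks_alt plaintext
instance (plaintext : String) (out : List String) : Decidable (Spec_plaintext_to_blocks plaintext out) := by unfold Spec_plaintext_to_blocks; infer_instance

-- ===== CLAIM (what is proved, stated in full; the proofs are below) =====
def Claim_equal_plaintext_to_blocks : Prop := ∀ (plaintext : String), Dom_plaintext_to_blocks plaintext → Spec_plaintext_to_blocks plaintext (plaintext_to_blocks plaintext)

-- ===== LEMMAS AND PROOFS =====

set_option maxRecDepth 8192 in
theorem toBinChars_len_le (n : Nat) (h : n < 256) :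
    (PySem.Int.toBinChars (n : Int)).length ≤ 8 := by
  revert h; revert n; decide

theorem fmt8_len (c : Char) (h : c.toNat < 256) : (pvFmt8 c).length = 8 := by
  have := toBinChars_len_le c.toNat h
  simp [pvFmt8]
  omega

theorem ofNat_small_lt (p : Nat) (h : p < 9) : (Char.ofNat p).toNat < 256 := by
  interval_cases p <;> decide

theorem flatMap_len (s : List Char) (hs : ∀ c ∈ s, (pvFmt8 c).length = 8) :
    (s.flatMap pvFmt8).length = 8 * s.length := by
  induction s with
  | nil => simp
  | cons c t ih =>
    simp only [List.flatMap_cons, List.length_append, List.length_cons,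
      hs c (List.mem_cons_self), ih (fun d hd => hs d (List.mem_cons_of_mem _ hd))]
    ring

theorem flatMap_drop (k : Nat) (s : List Char) (hs : ∀ c ∈ s, (pvFmt8 c).length = 8) :
    (s.flatMap pvFmt8).drop (8 * k) = (s.drop k).flatMap pvFmt8 := by
  induction k generalizing s with
  | zero => simp
  | succ k ih =>
    cases s with
    | nil => simp
    | cons c t =>
      have hc := hs c (List.mem_cons_self)
      have ht : ∀ d ∈ t, (pvFmt8 d).length = 8 := fun d hd => hs d (List.mem_cons_of_mem _ hd)
      rw [show 8 * (k + 1) = 8 + 8 * k by ring]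
      simp only [List.flatMap_cons, List.drop_append, hc,
        List.drop_eq_nil_of_le (by omega : (pvFmt8 c).length ≤ 8 + 8 * k), List.nil_append,
        show 8 + 8 * k - 8 = 8 * k by omega, List.drop_succ_cons]
      exact ih t ht

theorem flatMap_take (k : Nat) (s : List Char) (hs : ∀ c ∈ s, (pvFmt8 c).length = 8) :
    (s.flatMap pvFmt8).take (8 * k) = (s.take k).flatMap pvFmt8 := by
  induction k generalizing s with
  | zero => simp
  | succ k ih =>
    cases s with
    | nil => simp
    | cons c t =>
      have hc := hs c (List.mem_cons_self)
      have ht : ∀ d ∈ t, (pvFmt8 d).length = 8 := fun d hd => hs d (List.mem_cons_of_mem _ hd)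
      rw [show 8 * (k + 1) = 8 + 8 * k by ring]
      simp only [List.flatMap_cons, List.take_append, hc,
        List.take_of_length_le (by omega : (pvFmt8 c).length ≤ 8 + 8 * k),
        show 8 + 8 * k - 8 = 8 * k by omega, List.take_succ_cons]
      rw [ih t ht]

-- the per-block equality: bits 64k..64k+64 of the binary string are exactly the
-- formatted bits of characters 8k..8k+8
theorem block_eq (s : List Char) (hs : ∀ c ∈ s, (pvFmt8 c).length = 8) (k : Nat) :
    ((s.flatMap pvFmt8).drop (64 * k)).take 64
      = ((s.drop (8 * k)).take 8).flatMap pvFmt8 := by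
  have hd : ∀ c ∈ s.drop (8 * k), (pvFmt8 c).length = 8 :=
    fun c hc => hs c (List.mem_of_mem_drop hc)
  rw [show 64 * k = 8 * (8 * k) by ring, flatMap_drop _ s hs,
    show (64 : Nat) = 8 * 8 by norm_num, flatMap_take _ _ hd]

-- the two loops, over an arbitrary padded character list whose chars all format to 8 bits
theorem blocks_eq (p : List Char) (hs : ∀ c ∈ p, (pvFmt8 c).length = 8) :
    (PySem.List.pyRange 0 ((p.flatMap pvFmt8).length : Int) 64).foldl
      (fun blocks i =>
        blocks ++ [String.ofList (PySem.List.slice (p.flatMap pvFmt8) (some i) (some (i + 64)))]) []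
    = (PySem.List.pyRange 0 ((p.length : Nat) : Int) 8).foldl
      (fun blocks i =>
        blocks ++ [String.ofList ((PySem.List.slice p (some i) (some (i + 8))).flatMap pvFmt8)]) [] := by
  have hbinlen : (p.flatMap pvFmt8).length = 8 * p.length := flatMap_len p hs
  rw [PySem.List.foldl_append_singleton_eq_map, PySem.List.foldl_append_singleton_eq_map]
  simp only [List.nil_append]
  rw [PySem.List.pyRange_of_pos _ _ (by norm_num : (0:Int) < 64),
    PySem.List.pyRange_of_pos _ _ (by norm_num : (0:Int) < 8)]
  have hcount :
      (if (0:Int) < (((p.flatMap pvFmt8).length : Nat) : Int)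
        then (((((p.flatMap pvFmt8).length : Nat) : Int) - 0 + 64 - 1) / 64).toNat else 0)
      = (if (0:Int) < ((p.length : Nat) : Int)
        then ((((p.length : Nat) : Int) - 0 + 8 - 1) / 8).toNat else 0) := by
    rw [hbinlen]
    split_ifs with h1 h2 h2 <;> push_cast at h1 h2 ⊢ <;> omega
  rw [hcount, List.map_map, List.map_map]
  apply List.map_congr_left
  intro k _
  simp only [Function.comp]
  congr 1
  have e1 : (0 : Int) + 64 * (k : Nat) = ((64 * k : Nat) : Int) := by push_cast; ring
  have e2 : (0 : Int) + 64 * (k : Nat) + 64 = ((64 * k + 64 : Nat) : Int) := by push_cast; ring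
  have e3 : (0 : Int) + 8 * (k : Nat) = ((8 * k : Nat) : Int) := by push_cast; ring
  have e4 : (0 : Int) + 8 * (k : Nat) + 8 = ((8 * k + 8 : Nat) : Int) := by push_cast; ring
  rw [e2, e4, e1, e3, PySem.List.slice_natCast, PySem.List.slice_natCast]
  rw [show 64 * k + 64 - 64 * k = 64 by omega, show 8 * k + 8 - 8 * k = 8 by omega]
  exact block_eq p hs k

-- ===== VERDICT (by name: the statement is the Claim_ definition above) =====
theorem plaintext_to_blocks_spec : Claim_equal_plaintext_to_blocks := by
  intro plaintext hdom
  unfold Dom_plaintext_to_blocks pvDomStr at hdom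
  unfold Spec_plaintext_to_blocks plaintext_to_blocks plaintext_to_blocks_alt
    pkcs5_padding string_to_binary
  apply blocks_eq
  intro c hc
  apply fmt8_len
  rcases List.mem_append.mp hc with h | h
  · have hthis := List.all_eq_true.mp hdom c h
    simp only [pvDomChar, Bool.or_eq_true, Bool.and_eq_true, decide_eq_true_eq,
      beq_iff_eq] at hthis
    omega
  · have := List.eq_of_mem_replicate h
    subst this
    exact ofNat_small_lt _ (by omega)
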